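-- pv_equiv track=rewrite | github.com/jacobtpl/pokerbots | nitbot/player.py | get_board_texture
-- ===== SOURCE A (Python) =====
-- VALUE_MAP = {
--     '2': 2,
--     '3': 3,
--     '4': 4,
--     '5': 5,
--     '6': 6,
--     '7': 7,
--     '8': 8,
--     '9': 9,
--     'T': 10,
--     'J': 11,
--     'Q': 12,
--     'K': 13,
--     'A': 14,
-- }
--
-- def get_board_texture(board):
--     suits = [str(card)[1] for card in board]
--     ans = 0
--     for suit in suits:
--         if suits.count(suit) == 3:
--             ans += 20
--         elif suits.count(suit) == 2:
--             ans += 10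
--
--     numbers = [VALUE_MAP[str(card)[0]] for card in board]
--     for i in range(1,11):
--         cnt = 0
--         for _ in range(i,i+5):
--             val = _
--             if val == 1:
--                 val = 14
--             if numbers.count(val) >= 1:
--                 cnt += 1
--         if cnt == 2:
--             ans += 1
--         if cnt == 3:
--             ans += 5
--     # maxval = 20 + 17 = 37
--     # minval = 0
--     return ans
-- ===== SOURCE B (Python) =====
-- VALUE_MAP = {
--     '2': 2, '3': 3, '4': 4, '5': 5, '6': 6, '7': 7, '8': 8, '9': 9,
--     'T': 10, 'J': 11, 'Q': 12, 'K': 13, 'A': 14,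
-- }
--
-- def get_board_texture(board):
--     ans = 0
--     # suit score: sort the suits, scan maximal runs of equal suits once,
--     # add 60 for a run of 3 and 20 for a run of 2 (equals A's per-card sum)
--     suits = sorted(str(card)[1] for card in board)
--     i = 0
--     while i < len(suits):
--         j = i
--         while j < len(suits) and suits[j] == suits[i]:
--             j += 1
--         if j - i == 3:
--             ans += 60
--         elif j - i == 2:
--             ans += 20
--         i = j
--     # straight score: one sliding window over values 1..14 with an
--     # incrementally maintained count of present values (1 aliases 14)
--     vals = set()
--     for card in board:
--         vals.add(VALUE_MAP[str(card)[0]])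
--     if 14 in vals:
--         vals.add(1)
--     cnt = 0
--     for v in range(1, 6):
--         if v in vals:
--             cnt += 1
--     for i in range(1, 11):
--         if cnt == 2:
--             ans += 1
--         elif cnt == 3:
--             ans += 5
--         if i < 10:
--             cnt += (1 if (i + 5) in vals else 0) - (1 if i in vals else 0)
--     return ans
-- ===== Notes on version B (the rewrite author's own statement) =====
-- stated objective: alternative
-- what changed: The suit score is computed by sorting the suits once and scanning maximal runs of equal suits (adding 60/20 per run of 3/2) instead of re-counting the suit list for every card, and the ten straight windows are scored by a single sliding window whose count of present values (with 1 aliased to 14) is updated incrementally at each shift instead of recounting five membership tests per window.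
import Mathlib
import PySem

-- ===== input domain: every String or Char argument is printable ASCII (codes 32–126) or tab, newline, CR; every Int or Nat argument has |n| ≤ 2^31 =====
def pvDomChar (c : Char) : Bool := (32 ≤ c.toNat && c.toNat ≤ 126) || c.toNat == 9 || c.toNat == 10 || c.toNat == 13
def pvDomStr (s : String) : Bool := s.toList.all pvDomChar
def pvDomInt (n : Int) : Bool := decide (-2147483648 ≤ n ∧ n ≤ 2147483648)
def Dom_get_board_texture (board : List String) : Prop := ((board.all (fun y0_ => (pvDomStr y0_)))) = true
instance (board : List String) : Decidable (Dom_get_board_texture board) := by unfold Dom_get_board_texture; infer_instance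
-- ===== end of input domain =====

-- B replaces A's per-card repeated-scan suit loop by sort-then-run-scan (add 60/20 per
-- maximal run of 3/2 equal suits) and A's ten independently recounted straight windows
-- by a single sliding window whose present-value count is updated incrementally.

-- ===== PORT A =====
def pvValueMap : PySem.Dict Char Int := PySem.Dict.ofList
  [('2', 2), ('3', 3), ('4', 4), ('5', 5), ('6', 6), ('7', 7), ('8', 8), ('9', 9),
   ('T', 10), ('J', 11), ('Q', 12), ('K', 13), ('A', 14)]

-- str(card)[1]; total via getD — exact whenever the card has a second character (Pre_)
def pvSuitOf (card : String) : Char := (PySem.Str.pyGet? card 1).getD ' '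
-- VALUE_MAP[str(card)[0]]; total via getD — exact whenever card[0] is a VALUE_MAP key (Pre_)
def pvNumOf (card : String) : Int := (pvValueMap.get? ((PySem.Str.pyGet? card 0).getD ' ')).getD 0

def get_board_texture (board : List String) : Int :=
  let suits := board.map pvSuitOf
  let ans : Int := suits.foldl (fun ans suit =>
    if suits.count suit = 3 then ans + 20
    else if suits.count suit = 2 then ans + 10
    else ans) 0
  let numbers := board.map pvNumOf
  (PySem.List.pyRange 1 11 1).foldl (fun ans i =>
    let cnt : Int := (PySem.List.pyRange i (i + 5) 1).foldl (fun cnt v =>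
      let val := if v = 1 then 14 else v
      if 1 ≤ numbers.count val then cnt + 1 else cnt) 0
    let ans := if cnt = 2 then ans + 1 else ans
    if cnt = 3 then ans + 5 else ans) ans

-- ===== PORT B =====
-- Source B's two nested while loops: consume the leading run of the head suit, score it, recurse
def pvRunScan : List Char → Int → Int
  | [], ans => ans
  | c :: rest, ans =>
    let run := 1 + (rest.takeWhile (· == c)).length
    pvRunScan (rest.dropWhile (· == c))
      (if run = 3 then ans + 60 else if run = 2 then ans + 20 else ans)
termination_by l _ => l.length
decreasing_by
  simp only [List.length_cons]
  exact Nat.lt_succ_of_le (List.length_dropWhile_le _ rest)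

def get_board_texture_alt (board : List String) : Int :=
  let suits := PySem.List.sorted (board.map pvSuitOf) (fun x => x) false
  let ans : Int := pvRunScan suits 0
  let vals : PySem.Set Int :=
    board.foldl (fun s card => PySem.Set.add s (pvNumOf card)) PySem.Set.empty
  let vals := if vals.contains 14 then vals.add 1 else vals
  let cnt : Int := (PySem.List.pyRange 1 6 1).foldl
    (fun cnt v => if vals.contains v then cnt + 1 else cnt) 0
  ((PySem.List.pyRange 1 11 1).foldl (fun (p : Int × Int) i =>
      (if p.2 = 2 then p.1 + 1 else if p.2 = 3 then p.1 + 5 else p.1,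
       if i < 10 then p.2 + (if vals.contains (i + 5) then 1 else 0)
                       - (if vals.contains i then 1 else 0)
       else p.2)) (ans, cnt)).1

-- ===== PRECONDITION & SPEC =====
-- Pre_ excludes boards with a card shorter than two characters (A raises IndexError on card[1])
-- or whose first character is not a VALUE_MAP key (A raises KeyError); A returns on all other inputs.
def pvCardOK (s : String) : Bool :=
  match s.toList with
  | c :: _ :: _ => c ∈ ['2', '3', '4', '5', '6', '7', '8', '9', 'T', 'J', 'Q', 'K', 'A']
  | _ => false

def Pre_get_board_texture (board : List String) : Prop := board.all pvCardOK = true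
instance (board : List String) : Decidable (Pre_get_board_texture board) := by
  unfold Pre_get_board_texture; infer_instance

def pvWitness_get_board_texture : List String := ["As", "Kd", "Kh", "2d", "7s"]

def Spec_get_board_texture (board : List String) (out : Int) : Prop := out = get_board_texture_alt board
instance (board : List String) (out : Int) : Decidable (Spec_get_board_texture board out) := by
  unfold Spec_get_board_texture; infer_instance

-- ===== CLAIM (what is proved, stated in full; the proofs are below) =====
def Claim_equal_get_board_texture : Prop := ∀ (board : List String), Dom_get_board_texture board → Pre_get_board_texture board → Spec_get_board_texture board (get_board_texture board)

-- ===== LEMMAS AND PROOFS =====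

-- per-occurrence suit score of A, and the total A's suit loop accumulates
def pvG (n : Nat) : Int := if n = 3 then 20 else if n = 2 then 10 else 0
def pvSg (l : List Char) : Int := (l.map (fun s => pvG (l.count s))).sum

theorem pvSg_perm {l l' : List Char} (h : l.Perm l') : pvSg l = pvSg l' := by
  unfold pvSg
  have h1 : (fun s => pvG (l.count s)) = fun s => pvG (l'.count s) :=
    funext fun s => by rw [h.count_eq]
  rw [h1]
  exact (h.map _).sum_eq

-- A's suit loop is the sum of pvG over per-card counts
theorem pv_suitA_eq_Sg (suits : List Char) :
    suits.foldl (fun ans suit =>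
      if suits.count suit = 3 then ans + 20
      else if suits.count suit = 2 then ans + 10
      else ans) (0 : Int) = pvSg suits := by
  have e : (fun (ans : Int) suit => if suits.count suit = 3 then ans + 20
      else if suits.count suit = 2 then ans + 10 else ans)
      = fun ans suit => ans + pvG (suits.count suit) := by
    funext a s; unfold pvG; split_ifs <;> simp
  rw [e, PySem.List.foldl_add, zero_add, pvSg]

-- in a ≤-sorted list c :: rest, the takeWhile-run is all c and everything after it exceeds c
theorem pv_sorted_split (c : Char) (rest : List Char)
    (h : (c :: rest).Pairwise (· ≤ ·)) :
    (∀ x ∈ rest.takeWhile (· == c), x = c) ∧ (∀ x ∈ rest.dropWhile (· == c), c < x) := by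
  induction rest with
  | nil => simp
  | cons y r ih =>
    rcases List.pairwise_cons.mp h with ⟨hc, hyr⟩
    rcases List.pairwise_cons.mp hyr with ⟨hy, hr⟩
    by_cases hyc : y = c
    · subst hyc
      have ih' := ih (List.pairwise_cons.mpr ⟨fun x hx => hy x hx, hr⟩)
      simp only [List.takeWhile_cons, List.dropWhile_cons, BEq.rfl, if_true]
      constructor
      · intro x hx
        rcases List.mem_cons.mp hx with h1 | h1
        · exact h1
        · exact ih'.1 x h1
      · exact ih'.2
    · have hne : (y == c) = false := by simp [hyc]
      simp only [List.takeWhile_cons, List.dropWhile_cons, hne]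
      refine ⟨by simp, ?_⟩
      intro x hx
      have hcy : c < y := lt_of_le_of_ne (hc y (List.mem_cons_self)) (fun e => hyc e.symm)
      rcases List.mem_cons.mp hx with h1 | h1
      · exact h1 ▸ hcy
      · exact lt_of_lt_of_le hcy (hy x h1)

-- B's run scan of a sorted list totals A's per-occurrence sum
theorem pv_runScan_sorted : ∀ (n : Nat) (l : List Char), l.length ≤ n →
    l.Pairwise (· ≤ ·) → ∀ a : Int, pvRunScan l a = a + pvSg l := by
  intro n
  induction n with
  | zero =>
    intro l hl _ a
    have : l = [] := List.length_eq_zero_iff.mp (Nat.le_zero.mp hl)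
    subst this; simp [pvRunScan, pvSg]
  | succ n ih =>
    intro l hl hs a
    match l with
    | [] => simp [pvRunScan, pvSg]
    | c :: rest =>
      set t := rest.takeWhile (· == c) with ht
      set d := rest.dropWhile (· == c) with hd
      obtain ⟨hall, hgt⟩ := pv_sorted_split c rest hs
      have hrest : t ++ d = rest := List.takeWhile_append_dropWhile
      have hnotd : ∀ x ∈ d, x ≠ c := fun x hx e => absurd (e ▸ hgt x hx) (lt_irrefl c)
      -- count of c in the whole list is the run length
      have hct : t.count c = t.length :=
        List.count_eq_length.mpr (fun b hb => (hall b hb).symm)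
      have hcd : d.count c = 0 := List.count_eq_zero.mpr (fun hc => hnotd c hc rfl)
      have hcount : (c :: rest).count c = 1 + t.length := by
        rw [← hrest, List.count_cons_self, List.count_append, hct, hcd]; omega
      -- counts of the later elements are unchanged by dropping the run
      have hcx : ∀ x ∈ d, (c :: rest).count x = d.count x := by
        intro x hx
        rw [← hrest, List.count_cons_of_ne (fun e => hnotd x hx e.symm), List.count_append,
          List.count_eq_zero.mpr (fun hc => hnotd x hx ((hall x hc))), Nat.zero_add]
      -- split the sum
      have hSg : pvSg (c :: rest) = (1 + t.length) * pvG (1 + t.length) + pvSg d := by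
        unfold pvSg
        conv_lhs => rw [← hrest]
        rw [show c :: (t ++ d) = (c :: t) ++ d from rfl, List.map_append, List.sum_append]
        have h1 : ((c :: t).map fun s => pvG (((c :: t) ++ d).count s)).sum
            = (1 + t.length) * pvG (1 + t.length) := by
          have hmc : ∀ s ∈ c :: t, pvG (((c :: t) ++ d).count s) = pvG (1 + t.length) := by
            intro s hs'
            have : s = c := by
              rcases List.mem_cons.mp hs' with h1 | h1
              · exact h1
              · exact hall s h1
            rw [this, show (c :: t) ++ d = c :: rest by rw [List.cons_append, hrest], hcount]
          rw [List.map_congr_left hmc, List.map_const', List.sum_replicate, nsmul_eq_mul]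
          simp only [List.length_cons]
          push_cast [Nat.cast_add]
          ring
        have h2 : (d.map fun s => pvG (((c :: t) ++ d).count s)).sum = pvSg d := by
          unfold pvSg
          congr 1
          apply List.map_congr_left
          intro x hx
          rw [show (c :: t) ++ d = c :: rest by rw [List.cons_append, hrest], hcx x hx]
        rw [h1, h2]
        unfold pvSg
        ring
      -- sortedness and size of the remainder
      have hsd : d.Pairwise (· ≤ ·) :=
        (List.pairwise_cons.mp hs).2.sublist (hd ▸ List.dropWhile_sublist _)
      have hld : d.length ≤ n := by
        have h' := List.length_dropWhile_le (fun x => x == c) rest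
        rw [← hd] at h'
        simp only [List.length_cons] at hl
        omega
      rw [pvRunScan]
      simp only [← ht, ← hd]
      rw [ih d hld hsd, hSg]
      have hrm : (if 1 + t.length = 3 then a + 60 else if 1 + t.length = 2 then a + 20 else a)
          = a + (1 + (t.length : Int)) * pvG (1 + t.length) := by
        unfold pvG
        split_ifs <;> omega
      rw [hrm]
      ring

-- the straight windows: count of present values in window [i, i+5)
def pvWnd (b : Int → Bool) (i : Int) : Int := ((PySem.List.pyRange i (i + 5) 1).countP b : Nat)

-- sliding the window one step right exchanges the endpoints
theorem pv_wnd_slide (b : Int → Bool) (i : Int) :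
    pvWnd b (i + 1) = pvWnd b i + (if b (i + 5) then 1 else 0) - (if b i then 1 else 0) := by
  unfold pvWnd
  rw [PySem.List.pyRange_one_cons (show i < i + 5 by omega),
    show i + 1 + 5 = (i + 5) + 1 by ring,
    PySem.List.pyRange_one_succ_right (show i + 1 ≤ i + 5 by omega),
    List.countP_append, List.countP_cons]
  simp only [List.countP_cons, List.countP_nil]
  cases hb : b i <;> cases hb5 : b (i + 5) <;> simp

-- the outer loop: A recounting each window from scratch equals B sliding one count along
theorem pv_outer (b : Int → Bool) : ∀ (k : Nat) (i : Int), (11 - i).toNat ≤ k → 1 ≤ i →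
    ∀ a : Int,
    (PySem.List.pyRange i 11 1).foldl (fun ans j =>
      if pvWnd b j = 3 then (if pvWnd b j = 2 then ans + 1 else ans) + 5
      else (if pvWnd b j = 2 then ans + 1 else ans)) a
    = ((PySem.List.pyRange i 11 1).foldl (fun (p : Int × Int) j =>
        (if p.2 = 2 then p.1 + 1 else if p.2 = 3 then p.1 + 5 else p.1,
         if j < 10 then p.2 + (if b (j + 5) then 1 else 0) - (if b j then 1 else 0)
         else p.2)) (a, pvWnd b i)).1 := by
  intro k
  induction k with
  | zero =>
    intro i hk _ a
    rw [PySem.List.pyRange_one_eq_nil (by omega)]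
    simp
  | succ k ih =>
    intro i hk hi a
    by_cases h11 : 11 ≤ i
    · rw [PySem.List.pyRange_one_eq_nil (by omega)]
      simp
    · rw [PySem.List.pyRange_one_cons (by omega)]
      simp only [List.foldl_cons]
      -- both sides take the same step on ans; align the two if-shapes
      have hstep : ∀ c a' : Int,
          (if c = 3 then (if c = 2 then a' + 1 else a') + 5 else (if c = 2 then a' + 1 else a'))
          = (if c = 2 then a' + 1 else if c = 3 then a' + 5 else a') := by
        intro c a'; split_ifs <;> omega
      by_cases h10 : i < 10
      · rw [hstep, ih (i + 1) (by omega) (by omega)]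
        have : (if i < 10 then pvWnd b i + (if b (i + 5) then 1 else 0)
            - (if b i then 1 else 0) else pvWnd b i) = pvWnd b (i + 1) := by
          rw [if_pos h10, pv_wnd_slide]
        rw [this]
      · -- i = 10: the tail range is empty, only the first components matter
        have hie : i = 10 := by omega
        subst hie
        rw [show (10 : Int) + 1 = 11 from rfl, PySem.List.pyRange_one_eq_nil (by omega)]
        simp only [List.foldl_nil]
        rw [hstep]

-- characterisation of B's membership structure vals (with 1 aliased to 14)
theorem pv_contains_alias (numbers : List Int) (h1 : (1 : Int) ∉ numbers) (v : Int) :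
    (if (PySem.Set.ofList numbers).contains 14 then (PySem.Set.ofList numbers).add 1
     else PySem.Set.ofList numbers).contains v
    = decide (1 ≤ numbers.count (if v = 1 then 14 else v)) := by
  have hmem : ∀ w : Int, (PySem.Set.ofList numbers).contains w = decide (w ∈ numbers) := by
    intro w
    simp [PySem.Set.contains_eq_listContains, PySem.Set.mem_ofList]
  have hcnt : ∀ w : Int, decide (w ∈ numbers) = decide (1 ≤ numbers.count w) := by
    intro w
    simp [Nat.one_le_iff_ne_zero, ← Nat.pos_iff_ne_zero, List.count_pos_iff]
  by_cases hv : v = 1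
  · subst hv
    simp only [if_pos]
    by_cases h14 : (PySem.Set.ofList numbers).contains 14
    · rw [if_pos h14]
      have : ((PySem.Set.ofList numbers).add 1).contains 1 = true := by
        simp [PySem.Set.contains_eq_listContains, PySem.Set.mem_add]
      rw [this]
      rw [hmem, hcnt] at h14
      exact h14.symm
    · rw [if_neg h14]
      rw [hmem 14, hcnt] at h14
      rw [hmem 1]
      simp only [decide_eq_true_eq] at *
      simp [h1, fun h => h14 h]
  · rw [if_neg hv]
    have : (if (PySem.Set.ofList numbers).contains 14 then (PySem.Set.ofList numbers).add 1
        else PySem.Set.ofList numbers).contains v = (PySem.Set.ofList numbers).contains v := by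
      split
      · simp [PySem.Set.contains_eq_listContains, PySem.Set.mem_add, hv]
      · rfl
    rw [this, hmem, hcnt]

-- under Pre_, no card value is 1 (VALUE_MAP's values are 2..14)
theorem pv_numOf_ne_one (card : String) (hc : pvCardOK card = true) : pvNumOf card ≠ 1 := by
  unfold pvCardOK at hc
  rcases hl : card.toList with _ | ⟨c, rest⟩
  · rw [hl] at hc; simp at hc
  · rcases rest with _ | ⟨c2, rest2⟩
    · rw [hl] at hc; simp at hc
    · rw [hl] at hc
      simp only [decide_eq_true_eq, List.mem_cons, List.not_mem_nil, or_false] at hc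
      have hget : PySem.Str.pyGet? card 0 = some c := by
        have := PySem.Str.pyGet?_natCast card 0
        simp only [Nat.cast_zero] at this
        rw [this, hl]
        rfl
      unfold pvNumOf
      rw [hget]
      rcases hc with rfl | rfl | rfl | rfl | rfl | rfl | rfl | rfl | rfl | rfl | rfl | rfl | rfl <;>
        decide

-- ===== VERDICT (by name: the statement is the Claim_ definition above) =====
theorem get_board_texture_spec : Claim_equal_get_board_texture := by
  intro board _ hpre
  unfold Spec_get_board_texture get_board_texture get_board_texture_alt
  simp only []
  -- abbreviations
  have hvals : board.foldl (fun s card => PySem.Set.add s (pvNumOf card)) PySem.Set.empty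
      = PySem.Set.ofList (board.map pvNumOf) := by
    rw [← PySem.Set.update_map_eq_foldl_add]
    exact PySem.Set.update_nil_left _
  rw [hvals]
  set numbers := board.map pvNumOf with hnum
  set vals := (if (PySem.Set.ofList numbers).contains 14 then (PySem.Set.ofList numbers).add 1
    else PySem.Set.ofList numbers) with hv
  set b : Int → Bool := fun v => vals.contains v with hbdef
  -- Pre_: no card value is 1, so vals's alias 1 ↔ 14 matches A's remap
  have h1 : (1 : Int) ∉ numbers := by
    rw [hnum]
    intro hmem
    rcases List.mem_map.mp hmem with ⟨card, hcard, he⟩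
    exact pv_numOf_ne_one card (by
      have := List.all_eq_true.mp hpre card hcard
      simpa using this) he
  have hb : ∀ v : Int, b v = decide (1 ≤ numbers.count (if v = 1 then 14 else v)) := by
    intro v
    rw [hbdef, hv]
    exact pv_contains_alias numbers h1 v
  -- the suit part: A's per-card loop = B's run scan of the sorted suits
  have hsuit : pvRunScan (PySem.List.sorted (board.map pvSuitOf) (fun x => x) false) 0
      = (board.map pvSuitOf).foldl (fun ans suit =>
          if (board.map pvSuitOf).count suit = 3 then ans + 20
          else if (board.map pvSuitOf).count suit = 2 then ans + 10
          else ans) 0 := by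
    have hpair : (PySem.List.sorted (board.map pvSuitOf) (fun x => x) false).Pairwise (· ≤ ·) := by
      simpa using PySem.List.sorted_pairwise (board.map pvSuitOf) (fun x => x)
    rw [pv_runScan_sorted (PySem.List.sorted (board.map pvSuitOf) (fun x => x) false).length _
        le_rfl hpair 0, zero_add,
      pvSg_perm (PySem.List.sorted_perm (board.map pvSuitOf) (fun x => x) false),
      pv_suitA_eq_Sg]
  rw [← hsuit]
  set a0 : Int := pvRunScan (PySem.List.sorted (board.map pvSuitOf) (fun x => x) false) 0
  -- A's window recount is pvWnd b
  have hcnt : ∀ i : Int, (PySem.List.pyRange i (i + 5) 1).foldl (fun cnt v =>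
      let val := if v = 1 then 14 else v
      if 1 ≤ numbers.count val then cnt + 1 else cnt) 0 = pvWnd b i := by
    intro i
    rw [show (fun (cnt : Int) v => let val := if v = 1 then 14 else v
        if 1 ≤ numbers.count val then cnt + 1 else cnt)
      = fun cnt v => if 1 ≤ numbers.count (if v = 1 then 14 else v) then cnt + 1 else cnt
      from rfl]
    rw [PySem.List.foldl_ite_add_one
      (fun v => 1 ≤ numbers.count (if v = 1 then 14 else v)), zero_add, pvWnd]
    congr 1
    apply List.countP_congr
    intro v _
    rw [hb v]
  -- B's initial window count is pvWnd b 1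
  have hcnt0 : (PySem.List.pyRange 1 6 1).foldl
      (fun cnt v => if vals.contains v then cnt + 1 else cnt) 0 = pvWnd b 1 := by
    rw [PySem.List.foldl_ite_add_one (fun v => vals.contains v = true), zero_add,
      show (6 : Int) = 1 + 5 by norm_num, pvWnd]
    congr 1
    refine List.countP_congr ?_
    intro v _
    simp [hbdef]
  rw [hcnt0]
  -- rewrite A's loop body to the pvWnd form and conclude by the sliding-window lemma
  have hbody : (fun (ans i : Int) =>
      let cnt : Int := (PySem.List.pyRange i (i + 5) 1).foldl (fun cnt v =>
        let val := if v = 1 then 14 else v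
        if 1 ≤ numbers.count val then cnt + 1 else cnt) 0
      let ans := if cnt = 2 then ans + 1 else ans
      if cnt = 3 then ans + 5 else ans)
      = fun ans j => if pvWnd b j = 3 then (if pvWnd b j = 2 then ans + 1 else ans) + 5
          else (if pvWnd b j = 2 then ans + 1 else ans) := by
    funext ans i
    simp only [hcnt i]
  rw [hbody]
  exact pv_outer b 10 1 (by norm_num) (by norm_num) a0
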